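-- pv_equiv track=rewrite | github.com/sitleng/sam2-gui-annotator | src/services/sam_runner.py | balance_annotation_points
-- ===== SOURCE A (Python) =====
-- from typing import List, Tuple, Dict, Any
--
-- def balance_annotation_points(objects: List[Dict]) -> Tuple[List[List[Tuple[int, int]]], List[List[int]]]:
--     """
--     Balance annotation points by duplicating points from smaller samples.
--
--     Args:
--         objects: List of objects with 'positive' and 'negative' point lists
--
--     Returns:
--         Tuple of (balanced_points, balanced_labels)
--     """
--     if not objects:
--         return [], []
--
--     # Calculate total points for each object
--     point_counts = []
--     all_points = []
--     all_labels = []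
--
--     for obj in objects:
--         positive_points = obj.get("positive", [])
--         negative_points = obj.get("negative", [])
--         points = positive_points + negative_points
--         labels = [1] * len(positive_points) + [0] * len(negative_points)
--
--         if points:  # Only include objects with points
--             all_points.append(points)
--             all_labels.append(labels)
--             point_counts.append(len(points))
--
--     if not point_counts:
--         return [], []
--
--     # Find maximum number of points
--     max_points = max(point_counts)
--
--     # Balance by duplicating points
--     balanced_points = []
--     balanced_labels = []
--
--     for points, labels in zip(all_points, all_labels):
--         if len(points) < max_points:
--             # Duplicate points to match max_points
--             while len(points) < max_points:
--                 points.extend(points[:min(len(points), max_points - len(points))])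
--                 labels.extend(labels[:min(len(labels), max_points - len(labels))])
--
--         balanced_points.append(points[:max_points])
--         balanced_labels.append(labels[:max_points])
--
--     return balanced_points, balanced_labels
-- ===== SOURCE B (Python) =====
-- def balance_annotation_points(objects):
--     """Balance annotation points by cyclic modular tiling instead of doubling."""
--     merged = []
--     for obj in objects:
--         pos = obj.get("positive", [])
--         neg = obj.get("negative", [])
--         pts = pos + neg
--         if pts:
--             merged.append((pts, [1] * len(pos) + [0] * len(neg)))
--     if not merged:
--         return [], []
--     max_points = max(len(p) for p, _ in merged)
--     balanced_points = [[p[i % len(p)] for i in range(max_points)] for p, _ in merged]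
--     balanced_labels = [[l[i % len(l)] for i in range(max_points)] for _, l in merged]
--     return balanced_points, balanced_labels
-- ===== Notes on version B (the rewrite author's own statement) =====
-- stated objective: simpler
-- what changed: Replaces A's in-place geometric doubling while-loop (extend with a capped prefix, then truncate) by directly building each balanced list with one modular-index pass points[i % L] for i in range(max_points), keeping points and labels in one merged list of pairs.
import Mathlib
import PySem

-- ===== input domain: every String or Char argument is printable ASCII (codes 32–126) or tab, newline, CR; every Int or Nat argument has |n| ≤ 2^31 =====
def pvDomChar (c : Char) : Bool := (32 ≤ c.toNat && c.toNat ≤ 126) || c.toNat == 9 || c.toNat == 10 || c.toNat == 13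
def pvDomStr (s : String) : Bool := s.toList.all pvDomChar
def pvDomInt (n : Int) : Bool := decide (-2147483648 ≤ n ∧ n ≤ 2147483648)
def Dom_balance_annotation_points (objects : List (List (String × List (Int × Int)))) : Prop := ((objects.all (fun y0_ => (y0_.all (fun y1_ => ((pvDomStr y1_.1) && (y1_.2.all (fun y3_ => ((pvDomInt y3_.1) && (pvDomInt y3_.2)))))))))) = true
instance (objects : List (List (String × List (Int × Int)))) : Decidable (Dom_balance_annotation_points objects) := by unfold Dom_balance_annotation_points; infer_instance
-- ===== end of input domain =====

-- B replaces A's geometric doubling while-loop by one modular-index pass per object; objective: simpler.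

-- ===== PORT A =====
-- the `while len(points) < max_points: points.extend(...); labels.extend(...)` loop;
-- fuel = max_points is enough: each iteration grows the (nonempty) list by at least one.
def pvExtendLoop (fuel : Nat) (maxP : Nat) (points : List (Int × Int)) (labels : List Int) :
    List (Int × Int) × List Int :=
  match fuel with
  | 0 => (points, labels)
  | fuel + 1 =>
    if points.length < maxP then
      pvExtendLoop fuel maxP
        (points ++ points.take (min points.length (maxP - points.length)))
        (labels ++ labels.take (min labels.length (maxP - labels.length)))
    else (points, labels)

-- first `for obj in objects` loop: builds (all_points, all_labels, point_counts)
def pvGatherA : List (List (String × List (Int × Int))) →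
    List (List (Int × Int)) × List (List Int) × List Nat →
    List (List (Int × Int)) × List (List Int) × List Nat
  | [], acc => acc
  | obj :: rest, acc =>
    let d := PySem.Dict.ofList obj
    let pos := d.getD "positive" []
    let neg := d.getD "negative" []
    let points := pos ++ neg
    let labels := List.replicate pos.length (1 : Int) ++ List.replicate neg.length (0 : Int)
    pvGatherA rest
      (if points ≠ [] then (acc.1 ++ [points], acc.2.1 ++ [labels], acc.2.2 ++ [points.length])
       else acc)

-- second `for points, labels in zip(all_points, all_labels)` loop
def pvBalanceLoopA (maxP : Nat) : List (List (Int × Int) × List Int) →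
    List (List (Int × Int)) × List (List Int) → List (List (Int × Int)) × List (List Int)
  | [], acc => acc
  | (p, l) :: rest, acc =>
    let pl := if p.length < maxP then pvExtendLoop maxP maxP p l else (p, l)
    -- points[:max_points] / labels[:max_points] with a Nat bound is List.take (exact)
    pvBalanceLoopA maxP rest (acc.1 ++ [pl.1.take maxP], acc.2 ++ [pl.2.take maxP])

def balance_annotation_points (objects : List (List (String × List (Int × Int)))) :
    (List (List (Int × Int))) × List (List Int) :=
  if objects = [] then ([], [])
  else
    let g := pvGatherA objects ([], [], [])
    if g.2.2 = [] then ([], [])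
    else
      let maxP := (PySem.List.max? g.2.2 (fun x => x)).getD 0
      pvBalanceLoopA maxP (g.1.zip g.2.1) ([], [])

-- ===== PORT B =====
-- [base[i % len(base)] for i in range(n)]  (index always in range when base ≠ [])
def pvCyc {α : Type} (dflt : α) (base : List α) (n : Nat) : List α :=
  (List.range n).map (fun i => base.getD (i % base.length) dflt)

def balance_annotation_points_alt (objects : List (List (String × List (Int × Int)))) :
    (List (List (Int × Int))) × List (List Int) :=
  let merged := objects.foldl (fun acc obj =>
    let d := PySem.Dict.ofList obj
    let pos := d.getD "positive" []
    let neg := d.getD "negative" []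
    let pts := pos ++ neg
    if pts ≠ [] then
      acc ++ [(pts, List.replicate pos.length (1 : Int) ++ List.replicate neg.length (0 : Int))]
    else acc) []
  if merged = [] then ([], [])
  else
    let maxP := (PySem.List.max? (merged.map (fun pl => pl.1.length)) (fun x => x)).getD 0
    (merged.map (fun pl => pvCyc (0, 0) pl.1 maxP),
     merged.map (fun pl => pvCyc 0 pl.2 maxP))

-- ===== PRECONDITION & SPEC =====
def Spec_balance_annotation_points (objects : List (List (String × List (Int × Int)))) (out : (List (List (Int × Int))) × List (List Int)) : Prop := out = balance_annotation_points_alt objects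
instance (objects : List (List (String × List (Int × Int)))) (out : (List (List (Int × Int))) × List (List Int)) : Decidable (Spec_balance_annotation_points objects out) := by unfold Spec_balance_annotation_points; infer_instance

-- ===== CLAIM (what is proved, stated in full; the proofs are below) =====
def Claim_equal_balance_annotation_points : Prop := ∀ (objects : List (List (String × List (Int × Int)))), Dom_balance_annotation_points objects → Spec_balance_annotation_points objects (balance_annotation_points objects)

-- ===== LEMMAS AND PROOFS =====

-- generic single-list view of the joint while-loop
def pvLoop1 {α : Type} (fuel maxP : Nat) (xs : List α) : List α :=
  match fuel with
  | 0 => xs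
  | fuel + 1 =>
    if xs.length < maxP then
      pvLoop1 fuel maxP (xs ++ xs.take (min xs.length (maxP - xs.length)))
    else xs

theorem pvCyc_length {α : Type} (d : α) (b : List α) (n : Nat) : (pvCyc d b n).length = n := by
  simp [pvCyc]

theorem pvCyc_take {α : Type} (d : α) (b : List α) {k n : Nat} (h : k ≤ n) :
    (pvCyc d b n).take k = pvCyc d b k := by
  simp [pvCyc, ← List.map_take, List.take_range, Nat.min_eq_left h]

theorem pvCyc_append {α : Type} (d : α) (b : List α) {n : Nat} (k : Nat)
    (h : b.length ∣ n) : pvCyc d b n ++ pvCyc d b k = pvCyc d b (n + k) := by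
  obtain ⟨c, hc⟩ := h
  simp only [pvCyc, List.range_add, List.map_append, List.map_map]
  congr 1
  apply List.map_congr_left
  intro i _
  simp [hc, Nat.add_comm, Nat.add_mul_mod_self_left]

theorem pvCyc_self {α : Type} (d : α) (b : List α) : pvCyc d b b.length = b := by
  apply List.ext_getElem
  · simp [pvCyc]
  · intro i h1 h2
    simp only [pvCyc]
    rw [List.getElem_map]
    simp only [List.getElem_range]
    rw [Nat.mod_eq_of_lt h2, List.getD_eq_getElem _ _ h2]

theorem pvExtendLoop_eq_pair (fuel maxP : Nat) :
    ∀ (p : List (Int × Int)) (l : List Int), p.length = l.length →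
    pvExtendLoop fuel maxP p l = (pvLoop1 fuel maxP p, pvLoop1 fuel maxP l) := by
  induction fuel with
  | zero => intro p l _; rfl
  | succ fuel ih =>
    intro p l h
    simp only [pvExtendLoop, pvLoop1, ← h]
    split
    · apply ih
      simp [h]
    · rfl

theorem pvLoop1_done {α : Type} (fuel maxP : Nat) (xs : List α) (h : ¬ xs.length < maxP) :
    pvLoop1 fuel maxP xs = xs := by
  cases fuel <;> simp [pvLoop1, h]

theorem pvLoop1_cyc {α : Type} (d : α) (b : List α) (maxP : Nat) :
    ∀ (fuel n : Nat), 1 ≤ b.length → b.length ∣ n → 1 ≤ n → maxP ≤ n + fuel →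
    (pvLoop1 fuel maxP (pvCyc d b n)).take maxP = pvCyc d b maxP := by
  intro fuel
  induction fuel with
  | zero =>
    intro n _ _ _ hle
    simpa using pvCyc_take d b (by omega : maxP ≤ n)
  | succ fuel ih =>
    intro n hL hdvd hn hle
    by_cases hlt : n < maxP
    · simp only [pvLoop1, pvCyc_length, hlt, if_pos]
      rw [pvCyc_take d b (by omega : min n (maxP - n) ≤ n), pvCyc_append d b _ hdvd]
      by_cases hcase : n ≤ maxP - n
      · rw [Nat.min_eq_left hcase]
        exact ih (n + n) hL (Dvd.dvd.add hdvd hdvd) (by omega) (by omega)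
      · rw [Nat.min_eq_right (by omega)]
        have hmax : n + (maxP - n) = maxP := by omega
        rw [hmax, pvLoop1_done _ _ _ (by simp [pvCyc_length])]
        exact pvCyc_take d b le_rfl
    · rw [pvLoop1_done _ _ _ (by simpa [pvCyc_length] using hlt)]
      exact pvCyc_take d b (by omega)

-- per-element result of A's second loop body
theorem pvStep_eq (maxP : Nat) (p : List (Int × Int)) (l : List Int)
    (hne : p ≠ []) (hlen : l.length = p.length) :
    ((if p.length < maxP then pvExtendLoop maxP maxP p l else (p, l)).1.take maxP,
     (if p.length < maxP then pvExtendLoop maxP maxP p l else (p, l)).2.take maxP) =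
    (pvCyc (0, 0) p maxP, pvCyc 0 l maxP) := by
  have hp : 1 ≤ p.length := List.length_pos_iff.mpr hne
  have hl : 1 ≤ l.length := by omega
  by_cases h : p.length < maxP
  · rw [if_pos h, pvExtendLoop_eq_pair maxP maxP p l hlen.symm]
    have h1 : (pvLoop1 maxP maxP p).take maxP = pvCyc (0, 0) p maxP := by
      have := pvLoop1_cyc (0, 0) p maxP maxP p.length hp dvd_rfl hp (by omega)
      rwa [pvCyc_self] at this
    have h2 : (pvLoop1 maxP maxP l).take maxP = pvCyc 0 l maxP := by
      have := pvLoop1_cyc 0 l maxP maxP l.length hl dvd_rfl hl (by omega)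
      rwa [pvCyc_self] at this
    simp [h1, h2]
  · rw [if_neg h]
    have h1 : p.take maxP = pvCyc (0, 0) p maxP := by
      rw [← pvCyc_self (0, 0) p, pvCyc_take _ _ (by omega : maxP ≤ p.length)]
      simp [pvCyc_self]
    have h2 : l.take maxP = pvCyc 0 l maxP := by
      rw [← pvCyc_self 0 l, pvCyc_take _ _ (by omega : maxP ≤ l.length)]
      simp [pvCyc_self]
    simp [h1, h2]

-- abbreviation for B's fold step over one object
def pvStepB (acc : List (List (Int × Int) × List Int)) (obj : List (String × List (Int × Int))) :
    List (List (Int × Int) × List Int) :=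
  let d := PySem.Dict.ofList obj
  let pos := d.getD "positive" []
  let neg := d.getD "negative" []
  let pts := pos ++ neg
  if pts ≠ [] then
    acc ++ [(pts, List.replicate pos.length (1 : Int) ++ List.replicate neg.length (0 : Int))]
  else acc

theorem pvGatherA_eq (objs : List (List (String × List (Int × Int)))) :
    ∀ (m : List (List (Int × Int) × List Int)),
    pvGatherA objs (m.map Prod.fst, m.map Prod.snd, m.map (fun x => x.1.length)) =
      ((objs.foldl pvStepB m).map Prod.fst, (objs.foldl pvStepB m).map Prod.snd,
       (objs.foldl pvStepB m).map (fun x => x.1.length)) := by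
  induction objs with
  | nil => intro m; rfl
  | cons obj rest ih =>
    intro m
    simp only [pvGatherA, List.foldl_cons]
    by_cases h : (PySem.Dict.ofList obj).getD "positive" [] ++ (PySem.Dict.ofList obj).getD "negative" [] ≠ []
    · simp only [pvStepB]
      have := ih (m ++ [((PySem.Dict.ofList obj).getD "positive" [] ++ (PySem.Dict.ofList obj).getD "negative" [],
        List.replicate ((PySem.Dict.ofList obj).getD "positive" []).length (1 : Int) ++
        List.replicate ((PySem.Dict.ofList obj).getD "negative" []).length (0 : Int))])
      simpa [h] using this
    · simp only [pvStepB]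
      simpa [h] using ih m

theorem pvMerged_inv (objs : List (List (String × List (Int × Int)))) :
    ∀ (m : List (List (Int × Int) × List Int)),
    (∀ x ∈ m, x.1 ≠ [] ∧ x.2.length = x.1.length) →
    ∀ x ∈ objs.foldl pvStepB m, x.1 ≠ [] ∧ x.2.length = x.1.length := by
  induction objs with
  | nil => intro m hm; exact hm
  | cons obj rest ih =>
    intro m hm
    apply ih
    intro x hx
    simp only [pvStepB] at hx
    split at hx
    · rcases List.mem_append.mp hx with h | h
      · exact hm x h
      · rcases List.mem_singleton.mp h with rfl
        refine ⟨by assumption, by simp⟩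
    · exact hm x hx

theorem pvBalanceLoopA_eq (maxP : Nat) (rest : List (List (Int × Int) × List Int))
    (hinv : ∀ x ∈ rest, x.1 ≠ [] ∧ x.2.length = x.1.length) :
    ∀ (accP : List (List (Int × Int))) (accL : List (List Int)),
    pvBalanceLoopA maxP rest (accP, accL) =
      (accP ++ rest.map (fun pl => pvCyc (0, 0) pl.1 maxP),
       accL ++ rest.map (fun pl => pvCyc 0 pl.2 maxP)) := by
  induction rest with
  | nil => intro accP accL; simp [pvBalanceLoopA]
  | cons pl rest ih =>
    intro accP accL
    obtain ⟨p, l⟩ := pl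
    obtain ⟨hne, hlen⟩ := hinv (p, l) (List.mem_cons_self)
    have hstep := pvStep_eq maxP p l hne hlen
    simp only [pvBalanceLoopA]
    rw [ih (fun x hx => hinv x (List.mem_cons_of_mem _ hx))]
    have e1 : (if p.length < maxP then pvExtendLoop maxP maxP p l else (p, l)).1.take maxP
        = pvCyc (0, 0) p maxP := congrArg Prod.fst hstep
    have e2 : (if p.length < maxP then pvExtendLoop maxP maxP p l else (p, l)).2.take maxP
        = pvCyc 0 l maxP := congrArg Prod.snd hstep
    simp [e1, e2]

-- ===== VERDICT (by name: the statement is the Claim_ definition above) =====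
theorem balance_annotation_points_spec : Claim_equal_balance_annotation_points := by
  intro objects _
  show balance_annotation_points objects = balance_annotation_points_alt objects
  have hA : balance_annotation_points objects =
      (if objects = [] then ([], [])
       else if (pvGatherA objects ([], [], [])).2.2 = [] then ([], [])
       else pvBalanceLoopA ((PySem.List.max? (pvGatherA objects ([], [], [])).2.2 (fun x => x)).getD 0)
            ((pvGatherA objects ([], [], [])).1.zip (pvGatherA objects ([], [], [])).2.1) ([], [])) := rfl
  have hB : balance_annotation_points_alt objects =
      (if objects.foldl pvStepB [] = [] then ([], [])
       else ((objects.foldl pvStepB []).map (fun pl => pvCyc (0, 0) pl.1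
                ((PySem.List.max? ((objects.foldl pvStepB []).map (fun pl => pl.1.length)) (fun x => x)).getD 0)),
             (objects.foldl pvStepB []).map (fun pl => pvCyc 0 pl.2
                ((PySem.List.max? ((objects.foldl pvStepB []).map (fun pl => pl.1.length)) (fun x => x)).getD 0)))) := rfl
  have hg := pvGatherA_eq objects []
  simp only [List.map_nil] at hg
  rw [hA, hB, hg]
  by_cases hobj : objects = []
  · simp [hobj]
  · rw [if_neg hobj]
    by_cases hm : objects.foldl pvStepB [] = []
    · simp [hm]
    · have hnil : (objects.foldl pvStepB []).map (fun x => x.1.length) ≠ [] := by simp [hm]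
      rw [if_neg hnil, if_neg hm]
      have hzip : ((objects.foldl pvStepB []).map Prod.fst).zip ((objects.foldl pvStepB []).map Prod.snd)
          = objects.foldl pvStepB [] := Eq.symm (List.zip_of_prod rfl rfl)
      simp only [hzip]
      exact pvBalanceLoopA_eq _ _ (pvMerged_inv objects [] (by simp)) [] []
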